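-- pv_equiv track=rewrite | github.com/yasyf/cc-sentiment | client/cc_sentiment/tui/widgets.py | _on_line_segment
-- ===== SOURCE A (Python) =====
-- def _on_line_segment(h: int, row_score: int, rows: list[int | None]) -> bool:
--     if rows[h] is not None:
--         return False
--     prev_h = next((i for i in range(h - 1, -1, -1) if rows[i] is not None), None)
--     next_h = next((i for i in range(h + 1, 24) if rows[i] is not None), None)
--     if prev_h is None or next_h is None:
--         return False
--     prev_row, next_row = rows[prev_h], rows[next_h]
--     assert prev_row is not None and next_row is not None
--     return min(prev_row, next_row) < row_score < max(prev_row, next_row)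
-- ===== SOURCE B (Python) =====
-- def _on_line_segment(h: int, row_score: int, rows: list[int | None]) -> bool:
--     if rows[h] is not None:
--         return False
--     filled = [(i, v) for i, v in enumerate(rows[:24]) if v is not None]
--     k = sum(1 for i, _ in filled if i < h)
--     if k == 0 or k == len(filled):
--         return False
--     a = filled[k - 1][1]
--     b = filled[k][1]
--     return min(a, b) < row_score < max(a, b)
-- ===== Notes on version B (the rewrite author's own statement) =====
-- stated objective: alternative
-- what changed: B builds the ordered list of filled (index,value) pairs in rows[:24] once, locates h's rank k in it by counting filled indices below h, and reads both neighbors as the adjacent entries filled[k-1] and filled[k] of that list, instead of A's two directional nearest-neighbor scans out from h.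
import Mathlib
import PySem

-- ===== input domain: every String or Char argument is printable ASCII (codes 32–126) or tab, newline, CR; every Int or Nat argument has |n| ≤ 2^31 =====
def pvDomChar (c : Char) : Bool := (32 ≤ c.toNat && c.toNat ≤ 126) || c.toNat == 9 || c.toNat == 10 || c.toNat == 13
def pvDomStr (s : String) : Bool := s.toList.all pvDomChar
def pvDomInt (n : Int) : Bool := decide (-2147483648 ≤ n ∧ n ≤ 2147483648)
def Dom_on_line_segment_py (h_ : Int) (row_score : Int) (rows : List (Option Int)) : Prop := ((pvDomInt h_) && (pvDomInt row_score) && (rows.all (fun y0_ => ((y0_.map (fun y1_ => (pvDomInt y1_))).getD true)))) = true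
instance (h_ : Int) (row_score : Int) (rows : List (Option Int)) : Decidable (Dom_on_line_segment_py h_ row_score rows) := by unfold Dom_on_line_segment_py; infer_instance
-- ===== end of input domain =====

-- B replaces A's two directional nearest-neighbor scans out from h by materializing the
-- ordered list of filled (index,value) pairs of rows[:24] once, ranking h in it by counting
-- filled indices below h, and taking the neighbors as adjacent entries of that list
-- (alternative decomposition, same cost).


-- ===== PORT A =====
-- 'rows[i] is not None' test used by A's two generator scans (false also where rows[i] would raise)
def pvHit (rows : List (Option Int)) (i : Int) : Bool :=
  match PySem.List.pyGet? rows i with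
  | some (some _) => true
  | _ => false

def on_line_segment_py (h_ : Int) (row_score : Int) (rows : List (Option Int)) : Bool :=
  match PySem.List.pyGet? rows h_ with
  | none => false          -- IndexError on rows[h]; excluded by Pre_
  | some (some _) => false
  | some none =>
    let prev_h := (PySem.List.pyRange (h_ - 1) (-1) (-1)).find? (pvHit rows)
    let next_h := (PySem.List.pyRange (h_ + 1) 24 1).find? (pvHit rows)
    match prev_h, next_h with
    | some pi, some ni =>
      match PySem.List.pyGet? rows pi, PySem.List.pyGet? rows ni with
      | some (some prev_row), some (some next_row) =>
          decide (min prev_row next_row < row_score ∧ row_score < max prev_row next_row)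
      | _, _ => false
    | _, _ => false

-- ===== PORT B =====
-- B: list of filled (index, value) pairs of rows[:24], rank of h in it, adjacent neighbors
def on_line_segment_py_alt (h_ : Int) (row_score : Int) (rows : List (Option Int)) : Bool :=
  match PySem.List.pyGet? rows h_ with
  | none => false          -- IndexError on rows[h]
  | some (some _) => false
  | some none =>
    let filled := (PySem.List.enumerate (PySem.List.slice rows none (some 24)) 0).filter
      (fun x => x.2.isSome)
    let k := filled.countP (fun x => x.1 < h_)
    if k = 0 ∨ k = filled.length then false
    else
      match filled[k - 1]?, filled[k]? with
      | some (_, some a), some (_, some b) =>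
          decide (min a b < row_score ∧ row_score < max a b)
      | _, _ => false

-- ===== PRECONDITION & SPEC =====
-- Pre_ is exactly the set of inputs on which Python A returns: h a valid (possibly negative)
-- index, and — when rows[h] is None — the forward scan range(h+1,24) hits a filled row before
-- running off the end of a short list (or the list has at least 24 rows).
def Pre_on_line_segment_py (h_ : Int) (row_score : Int) (rows : List (Option Int)) : Prop :=
  PySem.Raise.InRange rows.length h_ ∧
  (PySem.List.pyGet? rows h_ = some none →
    (24 ≤ (rows.length : Int) ∨
     ∃ p ∈ PySem.List.pyRange (h_ + 1) (rows.length : Int) 1,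
       ((PySem.List.pyGet? rows p).join).isSome = true))
instance (h_ : Int) (row_score : Int) (rows : List (Option Int)) : Decidable (Pre_on_line_segment_py h_ row_score rows) := by unfold Pre_on_line_segment_py; infer_instance

def pvWitness_on_line_segment_py : Int × Int × List (Option Int) := (1, 5, [some 3, none, some 7])

def Spec_on_line_segment_py (h_ : Int) (row_score : Int) (rows : List (Option Int)) (out : Bool) : Prop := out = on_line_segment_py_alt h_ row_score rows
instance (h_ : Int) (row_score : Int) (rows : List (Option Int)) (out : Bool) : Decidable (Spec_on_line_segment_py h_ row_score rows out) := by unfold Spec_on_line_segment_py; infer_instance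

-- ===== CLAIM (what is proved, stated in full; the proofs are below) =====
def Claim_equal_on_line_segment_py : Prop := ∀ (h_ : Int) (row_score : Int) (rows : List (Option Int)), Dom_on_line_segment_py h_ row_score rows → Pre_on_line_segment_py h_ row_score rows → Spec_on_line_segment_py h_ row_score rows (on_line_segment_py h_ row_score rows)

-- ===== LEMMAS AND PROOFS =====

-- 'last filled value so far' fold used to characterize A's backward scan
def pvLast (l : List (Int × Option Int)) (p : Option Int) : Option Int :=
  l.foldl (fun acc x => match x.2 with | some y => some y | none => acc) p

def pvBridge (rows : List (Option Int)) : Option Int → Option Int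
  | some i => (PySem.List.pyGet? rows i).join
  | none => none

theorem pvHit_true {rows : List (Option Int)} {i : Int} (h : pvHit rows i = true) :
    ∃ y, PySem.List.pyGet? rows i = some (some y) := by
  unfold pvHit at h
  rcases hg : PySem.List.pyGet? rows i with _ | (_ | y) <;> simp [hg] at h ⊢

theorem pvLast_enumerate (l : List (Option Int)) (s : Int) (p : Option Int) :
    pvLast (PySem.List.enumerate l s) p =
      l.foldl (fun acc v => match v with | some y => some y | none => acc) p := by
  induction l generalizing s p with
  | nil => rfl
  | cons v rest ih => simp [PySem.List.enumerate_cons, pvLast, List.foldl] at *; exact ih _ _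

theorem pvPrev_bridge (rows : List (Option Int)) (h' : Nat) (hle : h' ≤ rows.length) :
    pvBridge rows ((PySem.List.pyRange ((h' : Int) - 1) (-1) (-1)).find? (pvHit rows)) =
      pvLast (PySem.List.enumerate (rows.take h') 0) none := by
  induction h' with
  | zero =>
    rw [PySem.List.pyRange_neg_one_eq_nil (by norm_num)]
    simp [pvBridge, pvLast]
  | succ m ih =>
    have hm : m < rows.length := hle
    have hcons : PySem.List.pyRange (((m + 1 : Nat) : Int) - 1) (-1) (-1)
        = (m : Int) :: PySem.List.pyRange ((m : Int) - 1) (-1) (-1) := by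
      push_cast
      rw [show ((m : Int) + 1 - 1) = (m : Int) by ring]
      exact PySem.List.pyRange_neg_one_cons (by omega)
    rw [hcons]
    have htake : rows.take (m + 1) = rows.take m ++ [rows[m]] := by
      rw [List.take_add_one]; simp [List.getElem?_eq_getElem hm]
    rw [htake]
    have hget : PySem.List.pyGet? rows (m : Int) = some rows[m] := by
      simp [PySem.List.pyGet?_natCast, List.getElem?_eq_getElem hm]
    have hlastapp : ∀ (v : Option Int) (l : List (Option Int)),
        pvLast (PySem.List.enumerate (l ++ [v]) 0) none =
          match v with
          | some y => some y
          | none => pvLast (PySem.List.enumerate l 0) none := by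
      intro v l
      rw [pvLast_enumerate, pvLast_enumerate, List.foldl_append]
      cases v <;> simp [List.foldl]
    rw [hlastapp]
    cases hv : rows[m] with
    | some y =>
      have hhit : pvHit rows (m : Int) = true := by simp [pvHit, hget, hv]
      simp [List.find?, hhit, pvBridge, hget, hv]
    | none =>
      have hhit : pvHit rows (m : Int) = false := by simp [pvHit, hget, hv]
      rw [List.find?]
      simp only [hhit]
      exact ih (le_of_lt hm)

theorem pvNext_bridge (rows : List (Option Int)) (d : Nat) : ∀ (a : Nat), a + d = 24 →
    pvBridge rows ((PySem.List.pyRange (a : Int) 24 1).find? (pvHit rows)) =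
      (match (PySem.List.enumerate ((rows.take 24).drop a) (a : Int)).find?
          (fun x => x.2.isSome) with
        | some x => x.2
        | none => none) := by
  induction d with
  | zero =>
    intro a ha
    have : a = 24 := by omega
    subst this
    rw [PySem.List.pyRange_one_eq_nil (by norm_num)]
    have : (rows.take 24).drop 24 = [] := List.drop_eq_nil_of_le (by simpa using List.length_take_le 24 rows)
    simp [this, pvBridge]
  | succ m ih =>
    intro a ha
    have ha24 : a < 24 := by omega
    have hcons : PySem.List.pyRange (a : Int) 24 1
        = (a : Int) :: PySem.List.pyRange ((a : Int) + 1) 24 1 :=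
      PySem.List.pyRange_one_cons (by exact_mod_cast ha24)
    rw [hcons]
    by_cases hlen : a < rows.length
    · have hlt : a < (rows.take 24).length := by simp [List.length_take]; omega
      have hdrop : (rows.take 24).drop a = (rows.take 24)[a] :: (rows.take 24).drop (a + 1) :=
        List.drop_eq_getElem_cons hlt
      have hgete : (rows.take 24)[a] = rows[a] := List.getElem_take ..
      have hget : PySem.List.pyGet? rows (a : Int) = some rows[a] := by
        simp [PySem.List.pyGet?_natCast, List.getElem?_eq_getElem hlen]
      rw [hdrop, hgete, PySem.List.enumerate_cons]
      cases hv : rows[a] with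
      | some y =>
        have hhit : pvHit rows (a : Int) = true := by simp [pvHit, hget, hv]
        simp [List.find?, hhit, pvBridge, hget, hv]
      | none =>
        have hhit : pvHit rows (a : Int) = false := by simp [pvHit, hget, hv]
        rw [List.find?]
        simp only [hhit]
        have := ih (a + 1) (by omega)
        rw [List.find?]
        simp only [Option.isSome_none]
        push_cast at this ⊢
        exact this
    · have hdrop : (rows.take 24).drop a = [] :=
        List.drop_eq_nil_of_le (by simp [List.length_take]; omega)
      have hnone : ((a : Int) :: PySem.List.pyRange ((a : Int) + 1) 24 1).find? (pvHit rows) = none := by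
        rw [← hcons]
        apply List.find?_eq_none.2
        intro x hx
        have hx' := (PySem.List.mem_pyRange_one).1 hx
        have : PySem.List.pyGet? rows x = none := by
          rw [PySem.List.pyGet?_eq_none_iff]
          intro hr
          rcases hr with ⟨h1, h2⟩
          omega
        simp [pvHit, this]
      rw [hnone]
      simp [hdrop, pvBridge]

-- the fold that keeps the last filled value IS the last entry of the filter-isSome list
theorem pvLast_eq_filter (l : List (Int × Option Int)) :
    pvLast l none =
      (match (l.filter (fun x => x.2.isSome)).getLast? with
       | some x => x.2
       | none => none) := by
  induction l using List.reverseRecOn with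
  | nil => rfl
  | append_singleton l x ih =>
    obtain ⟨i, v⟩ := x
    cases v with
    | some y => simp [pvLast, List.foldl_append, List.filter_append]
    | none => simpa [pvLast, List.foldl_append, List.filter_append] using ih

theorem pvFind_eq_head_filter {α : Type} (p : α → Bool) (l : List α) :
    l.find? p = (l.filter p).head? := by
  induction l with
  | nil => rfl
  | cons x rest ih =>
    rw [List.find?, List.filter]
    cases hx : p x
    · rw [ih]
    · rfl

theorem pv_main (h_ : Int) (row_score : Int) (rows : List (Option Int))
    (hin : PySem.Raise.InRange rows.length h_)
    (hfwd : PySem.List.pyGet? rows h_ = some none →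
      (24 ≤ (rows.length : Int) ∨
       ∃ p ∈ PySem.List.pyRange (h_ + 1) (rows.length : Int) 1,
         ((PySem.List.pyGet? rows p).join).isSome = true)) :
    on_line_segment_py h_ row_score rows = on_line_segment_py_alt h_ row_score rows := by
  have hslice : PySem.List.slice rows none (some 24) = rows.take 24 := by
    rw [show (24 : Int) = ((24 : Nat) : Int) by norm_num, PySem.List.slice_to_natCast]
  rcases hget : PySem.List.pyGet? rows h_ with _ | (_ | y)
  · simp [on_line_segment_py, on_line_segment_py_alt, hget]
  · -- rows[h] is None
    rw [on_line_segment_py, on_line_segment_py_alt, hget, hslice]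
    set t := rows.take 24 with ht
    set filled := (PySem.List.enumerate t 0).filter (fun x => x.2.isSome) with hfil
    have hmem_idx : ∀ x ∈ filled, ∃ (k : Nat), k < t.length ∧ x = ((k : Int), t[k]!) ∧ x.2.isSome := by
      intro x hx
      have hxe := List.mem_of_mem_filter hx
      have hxs := List.of_mem_filter hx
      rcases (PySem.List.mem_enumerate_iff _ _ _).1 hxe with ⟨k, hk, rfl⟩
      exact ⟨k, hk, by simp [getElem!_pos t k hk], by simpa using hxs⟩
    by_cases hle : h_ ≤ 0
    · -- h ≤ 0 : prev side empty for A, rank 0 for B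
      rw [PySem.List.pyRange_neg_one_eq_nil (by omega)]
      have hk0 : filled.countP (fun x => x.1 < h_) = 0 := by
        rw [List.countP_eq_zero]
        intro x hx
        rcases hmem_idx x hx with ⟨k, _, rfl, _⟩
        simp; omega
      simp [hk0, List.find?]
    · by_cases h23 : 23 ≤ h_
      · -- h ≥ 23 : next side empty for A, rank = length for B
        rw [PySem.List.pyRange_one_eq_nil (by omega)]
        have hkfull : filled.countP (fun x => x.1 < h_) = filled.length := by
          rw [List.countP_eq_length]
          intro x hx
          rcases hmem_idx x hx with ⟨k, hk, rfl, hs⟩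
          have hk24 : k < 24 := by
            have := hk
            simp [ht, List.length_take] at this
            omega
          simp only [decide_eq_true_eq]
          by_contra hcon
          have hk23 : k = 23 ∧ h_ = 23 := by constructor <;> omega
          obtain ⟨rfl, rfl⟩ := hk23
          have h23len : 23 < rows.length := by
            rcases hin with ⟨_, _⟩; omega
          have : t[23]! = rows[23] := by
            rw [getElem!_pos t 23 hk]
            exact List.getElem_take ..
          rw [this] at hs
          have : rows[23] = none := by
            rw [show (23 : Int) = ((23 : Nat) : Int) by norm_num, PySem.List.pyGet?_natCast,
              List.getElem?_eq_getElem h23len] at hget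
            exact Option.some_injective _ hget
          simp [this] at hs
        rcases hprev : (PySem.List.pyRange (h_ - 1) (-1) (-1)).find? (pvHit rows) with _ | pi <;>
          simp [hkfull, List.find?]
      · -- 0 < h_ < 23
        obtain ⟨h', rfl⟩ : ∃ h' : Nat, h_ = (h' : Nat) := ⟨h_.toNat, by omega⟩
        have hhlen : h' < rows.length := by
          rcases hin with ⟨_, h2⟩; omega
        have h24 : h' < 23 := by omega
        have hlt : h' < t.length := by simp [ht, List.length_take]; omega
        have hrh : rows[h'] = none := by
          rw [PySem.List.pyGet?_natCast, List.getElem?_eq_getElem hhlen] at hget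
          exact Option.some_injective _ hget
        have hth : t[h'] = (none : Option Int) := by
          rw [show t[h'] = rows[h'] from List.getElem_take ..]; exact hrh
        have httake : t.take h' = rows.take h' := by
          rw [ht, List.take_take]; congr 1; omega
        have hlen_take : (t.take h').length = h' := by simp [List.length_take]; omega
        -- split filled into the parts before and after index h'
        set F1 := ((PySem.List.enumerate (t.take h') 0).filter (fun x => x.2.isSome)) with hF1
        set F2 := ((PySem.List.enumerate (t.drop (h' + 1)) ((h' : Int) + 1)).filter
          (fun x => x.2.isSome)) with hF2
        have hsplit : filled = F1 ++ F2 := by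
          rw [hfil]
          conv_lhs => rw [show t = t.take h' ++ t.drop h' from (List.take_append_drop h' t).symm,
            List.drop_eq_getElem_cons hlt, hth]
          rw [PySem.List.enumerate_append, List.filter_append,
            show ((0 : Int) + ((t.take h').length : Int)) = (h' : Int) by
              push_cast [hlen_take]; ring,
            PySem.List.enumerate_cons]
          simp [hF1, hF2]
        have hmemF1 : ∀ x ∈ F1, x.1 < (h' : Int) := by
          intro x hx
          rcases (PySem.List.mem_enumerate_iff _ _ _).1 (List.mem_of_mem_filter hx) with ⟨k, hk, rfl⟩
          rw [hlen_take] at hk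
          simp; omega
        have hmemF2 : ∀ x ∈ F2, (h' : Int) < x.1 := by
          intro x hx
          rcases (PySem.List.mem_enumerate_iff _ _ _).1 (List.mem_of_mem_filter hx) with ⟨k, hk, rfl⟩
          simp; omega
        have hk : filled.countP (fun x => x.1 < (h' : Int)) = F1.length := by
          rw [hsplit, List.countP_append]
          have c1 : F1.countP (fun x => x.1 < (h' : Int)) = F1.length := by
            rw [List.countP_eq_length]
            intro x hx
            simpa using hmemF1 x hx
          have c2 : F2.countP (fun x => x.1 < (h' : Int)) = 0 := by
            rw [List.countP_eq_zero]
            intro x hx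
            have := hmemF2 x hx
            simp; omega
          omega
        -- bridges for A's two scans
        have hprev := pvPrev_bridge rows h' (le_of_lt hhlen)
        rw [← httake, pvLast_eq_filter, ← hF1] at hprev
        have hnext := pvNext_bridge rows (24 - (h' + 1)) (h' + 1) (by omega)
        have hc1 : ((h' + 1 : Nat) : Int) = (h' : Int) + 1 := by push_cast; ring
        rw [hc1, ← ht] at hnext
        rw [pvFind_eq_head_filter (fun x => x.2.isSome)
            (PySem.List.enumerate (t.drop (h' + 1)) ((h' : Int) + 1)), ← hF2] at hnext
        -- values in F1/F2 are filled
        have hv1 : ∀ x ∈ F1, x.2.isSome := fun x hx => by simpa using List.of_mem_filter hx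
        have hv2 : ∀ x ∈ F2, x.2.isSome := fun x hx => by simpa using List.of_mem_filter hx
        rcases hA : (PySem.List.pyRange ((h' : Int) - 1) (-1) (-1)).find? (pvHit rows) with _ | pi
        · -- prev find none → F1 = [] → rank 0 → both false
          rw [hA] at hprev
          simp only [pvBridge] at hprev
          have hF1nil : F1 = [] := by
            rcases hl : F1.getLast? with _ | x
            · exact List.getLast?_eq_none_iff.1 hl
            · rw [hl] at hprev
              have hprev' : (none : Option Int) = x.2 := hprev
              have := hv1 x (List.mem_of_getLast? hl)
              rcases Option.isSome_iff_exists.1 this with ⟨y, hy⟩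
              rw [hy] at hprev'; cases hprev'
          have : filled.countP (fun x => x.1 < (h' : Int)) = 0 := by rw [hk, hF1nil]; rfl
          simp [this]
        · rw [hA] at hprev
          obtain ⟨py, hpy⟩ := pvHit_true (List.find?_some hA)
          simp only [pvBridge, hpy, Option.join] at hprev
          rcases hB : (PySem.List.pyRange ((h' : Int) + 1) 24 1).find? (pvHit rows) with _ | ni
          · -- next find none → F2 = [] → rank = length → both false
            rw [hB] at hnext
            simp only [pvBridge] at hnext
            have hF2nil : F2 = [] := by
              rcases hl : F2.head? with _ | x
              · exact List.head?_eq_none_iff.1 hl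
              · rw [hl] at hnext
                have hnext' : (none : Option Int) = x.2 := hnext
                have := hv2 x (List.mem_of_head? hl)
                rcases Option.isSome_iff_exists.1 this with ⟨y, hy⟩
                rw [hy] at hnext'; cases hnext'
            have hfull : filled.countP (fun x => x.1 < (h' : Int)) = filled.length := by
              rw [hk, hsplit, hF2nil]; simp
            simp [hfull]
          · -- both sides found: neighbors are last of F1 / head of F2
            rw [hB] at hnext
            obtain ⟨ny, hny⟩ := pvHit_true (List.find?_some hB)
            simp only [pvBridge, hny, Option.join] at hnext
            obtain ⟨x1, hl1⟩ : ∃ x1, F1.getLast? = some x1 := by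
              rcases hl : F1.getLast? with _ | x1
              · rw [hl] at hprev; cases hprev
              · exact ⟨x1, rfl⟩
            obtain ⟨x2, hl2⟩ : ∃ x2, F2.head? = some x2 := by
              rcases hl : F2.head? with _ | x2
              · rw [hl] at hnext; cases hnext
              · exact ⟨x2, rfl⟩
            rw [hl1] at hprev
            rw [hl2] at hnext
            have hprev' : some py = x1.2 := hprev
            have hnext' : some ny = x2.2 := hnext
            have hF1ne : F1 ≠ [] := fun h => by rw [h] at hl1; cases hl1
            have hF2ne : F2 ≠ [] := fun h => by rw [h] at hl2; cases hl2
            have hkpos : F1.length ≠ 0 := fun h => hF1ne (List.eq_nil_of_length_eq_zero h)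
            have hknotfull : F1.length ≠ filled.length := by
              rw [hsplit, List.length_append]
              have : F2.length ≠ 0 := fun h => hF2ne (List.eq_nil_of_length_eq_zero h)
              omega
            have hidx1 : filled[F1.length - 1]? = some x1 := by
              rw [hsplit, List.getElem?_append_left (by omega),
                ← List.getLast?_eq_getElem?]
              exact hl1
            have hidx2 : filled[F1.length]? = some x2 := by
              rw [hsplit, List.getElem?_append_right (le_refl _)]
              simpa [← List.head?_eq_getElem?] using hl2
            obtain ⟨i1, v1⟩ := x1
            obtain ⟨i2, v2⟩ := x2
            have hv1' : v1 = some py := by simpa using hprev'.symm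
            have hv2' : v2 = some ny := by simpa using hnext'.symm
            subst hv1'
            subst hv2'
            simp [hpy, hny, hk, hkpos, hknotfull, hidx1, hidx2]
  · simp [on_line_segment_py, on_line_segment_py_alt, hget]

-- ===== VERDICT (by name: the statement is the Claim_ definition above) =====
theorem on_line_segment_py_spec : Claim_equal_on_line_segment_py := by
  intro h_ row_score rows _ hpre
  unfold Spec_on_line_segment_py
  exact pv_main h_ row_score rows hpre.1 hpre.2
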